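-- pv_equiv track=rewrite | github.com/christerso/lore | tools/blender/AEON_Game_Dev_Toolkit/aeon_game_dev_toolkit.py | optimize_vertex_order
-- ===== SOURCE A (Python) =====
-- def optimize_vertex_order(triangles):
--     """Simple vertex cache optimization using tipsy algorithm"""
--     if not triangles:
--         return []
--
--     # Build adjacency information
--     vertex_to_triangles = {}
--     for i, tri in enumerate(triangles):
--         for vertex in tri:
--             if vertex not in vertex_to_triangles:
--                 vertex_to_triangles[vertex] = []
--             vertex_to_triangles[vertex].append(i)
--
--     # Start with first triangle
--     optimized = [triangles[0]]
--     remaining = triangles[1:]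
--     used_vertices = set(triangles[0])
--
--     while remaining:
--         best_triangle = None
--         best_score = -1
--
--         # Find triangle with most vertices already in cache
--         for i, tri in enumerate(remaining):
--             score = sum(1 for v in tri if v in used_vertices)
--             if score > best_score:
--                 best_score = score
--                 best_triangle = i
--
--         if best_triangle is not None:
--             # Add best triangle
--             tri = remaining.pop(best_triangle)
--             optimized.append(tri)
--             used_vertices.update(tri)
--         else:
--             # No good candidates, take next one
--             optimized.append(remaining.pop(0))
--             used_vertices.update(optimized[-1])
--
--     return optimized
-- ===== SOURCE B (Python) =====
-- def optimize_vertex_order(triangles):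
--     """Greedy vertex-cache reordering with incrementally maintained scores.
--
--     Instead of recomputing each remaining triangle's overlap with the used-vertex
--     set on every round, build a vertex -> triangle-occurrence adjacency map once
--     and bump the affected triangles' scores whenever a vertex becomes used.
--     """
--     if not triangles:
--         return []
--
--     # one entry per OCCURRENCE of v in triangles[i]
--     vert_tris = {}
--     for i, tri in enumerate(triangles):
--         for v in tri:
--             vert_tris.setdefault(v, []).append(i)
--
--     score = {}   # id -> current overlap with the used-vertex set
--     used = set()
--
--     def absorb(tri):
--         for v in tri:
--             if v not in used:
--                 used.add(v)
--                 for j in vert_tris[v]: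
--                     score[j] = score.get(j, 0) + 1
--
--     optimized = [triangles[0]]
--     absorb(triangles[0])
--     alive = list(enumerate(triangles))[1:]
--     while alive:
--         best = max(alive, key=lambda it: score.get(it[0], 0))
--         alive.remove(best)
--         optimized.append(best[1])
--         absorb(best[1])
--     return optimized
-- ===== Notes on version B (the rewrite author's own statement) =====
-- stated objective: faster
-- what changed: Instead of rescanning every remaining triangle's vertices against the used-vertex set each round, B builds a vertex-to-triangle-occurrence adjacency map once and incrementally bumps per-triangle scores when a vertex first becomes used, selecting each round by a single max over stored scores.
import Mathlib
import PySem

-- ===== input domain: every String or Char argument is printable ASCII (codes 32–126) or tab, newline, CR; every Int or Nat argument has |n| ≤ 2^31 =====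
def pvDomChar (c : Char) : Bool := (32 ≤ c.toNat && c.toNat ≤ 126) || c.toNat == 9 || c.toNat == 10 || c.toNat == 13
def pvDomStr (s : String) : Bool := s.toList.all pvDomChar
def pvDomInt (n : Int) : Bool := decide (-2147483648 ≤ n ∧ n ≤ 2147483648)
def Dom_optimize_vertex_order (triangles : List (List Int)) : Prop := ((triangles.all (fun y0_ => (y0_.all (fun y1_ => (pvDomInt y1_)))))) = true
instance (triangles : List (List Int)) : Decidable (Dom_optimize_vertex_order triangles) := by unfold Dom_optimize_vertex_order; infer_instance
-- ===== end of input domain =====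

-- B replaces A's per-round rescan of every remaining triangle's vertices by scores
-- maintained incrementally through a vertex → triangle-occurrence adjacency map
-- (objective: faster by a constant factor; a timing run measures it).

-- ===== PORT A =====
-- A builds vertex_to_triangles but never reads it; the port keeps the dead computation.
def pvVttA (triangles : List (List Int)) : PySem.Dict Int (List Int) :=
  (PySem.List.enumerate triangles).foldl
    (fun d p =>
      p.2.foldl
        (fun d v =>
          let d1 := if d.contains v then d else d.insert v ([] : List Int)
          d1.insert v (d1.getD v [] ++ [p.1]))
        d)
    PySem.Dict.empty

-- score = sum(1 for v in tri if v in used_vertices)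
def pvScoreA (used : PySem.Set Int) (tri : List Int) : Int :=
  tri.foldl (fun acc v => if PySem.Set.contains used v then acc + 1 else acc) 0

-- the inner 'for i, tri in enumerate(remaining)' selection loop
def pvBestA (used : PySem.Set Int) (remaining : List (List Int)) : Int × Option Int :=
  (PySem.List.enumerate remaining).foldl
    (fun st p =>
      let score := pvScoreA used p.2
      if score > st.1 then (score, some p.1) else st)
    (-1, none)

lemma pvPop_length {xs : List (List Int)} {i : Int} {r : List Int × List (List Int)}
    (h : PySem.List.pop? xs i = some r) : r.2.length < xs.length := by
  have := PySem.List.length_of_pop?_eq_some xs h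
  omega

-- the 'while remaining:' loop of A
def pvLoopA (optimized : List (List Int)) (remaining : List (List Int)) (used : PySem.Set Int) :
    List (List Int) :=
  if h0 : remaining = [] then optimized
  else
    match (pvBestA used remaining).2 with
    | some i =>
        -- remaining.pop(best_triangle); the chosen index is always in range
        let tr := (PySem.List.pop? remaining i).getD ([], [])
        pvLoopA (optimized ++ [tr.1]) tr.2 (PySem.Set.update used tr.1)
    | none =>
        -- remaining.pop(0); remaining is nonempty here
        let tr := (PySem.List.pop? remaining 0).getD ([], [])
        pvLoopA (optimized ++ [tr.1]) tr.2 (PySem.Set.update used tr.1)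
  termination_by remaining.length
  decreasing_by
  · rcases hp : PySem.List.pop? remaining i with _ | tr
    · simpa [hp] using List.length_pos_of_ne_nil h0
    · simpa [hp] using pvPop_length hp
  · rcases hp : PySem.List.pop? remaining 0 with _ | tr
    · simpa [hp] using List.length_pos_of_ne_nil h0
    · simpa [hp] using pvPop_length hp

def optimize_vertex_order (triangles : List (List Int)) : List (List Int) :=
  match triangles with
  | [] => []
  | t0 :: rest =>
    let _vtt := pvVttA triangles   -- dead in A too
    pvLoopA [t0] rest (PySem.Set.ofList t0)

-- ===== PORT B =====
-- vert_tris.setdefault(v, []).append(i)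
def pvVttB (triangles : List (List Int)) : PySem.Dict Int (List Int) :=
  (PySem.List.enumerate triangles).foldl
    (fun d p => p.2.foldl (fun d v => PySem.Dict.modify d v [] (fun js => js ++ [p.1])) d)
    PySem.Dict.empty

-- absorb(tri): mark tri's vertices used, bumping the score of every triangle occurrence
def pvAbsorb (vt : PySem.Dict Int (List Int)) (st : PySem.Set Int × PySem.Dict Int Int)
    (tri : List Int) : PySem.Set Int × PySem.Dict Int Int :=
  tri.foldl
    (fun st v =>
      if PySem.Set.contains st.1 v then st
      else
        (PySem.Set.add st.1 v,
         (PySem.Dict.getD vt v []).foldl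
           (fun s j => PySem.Dict.modify s j 0 (fun x => x + 1)) st.2))
    st

lemma pvRemove_length {α : Type} [BEq α] [LawfulBEq α] {xs ys : List α} {v : α}
    (h : PySem.List.remove? xs v = some ys) : ys.length < xs.length := by
  simp only [PySem.List.remove?, Option.map_eq_some_iff] at h
  obtain ⟨k, hk, rfl⟩ := h
  obtain ⟨hlt, -, -⟩ := List.idxOf?_eq_some_iff.mp hk
  simp [List.length_eraseIdx, hlt]
  omega

-- the 'while alive:' loop of B
def pvLoopB (vt : PySem.Dict Int (List Int)) (optimized : List (List Int))
    (alive : List (Int × List Int)) (st : PySem.Set Int × PySem.Dict Int Int) :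
    List (List Int) :=
  if h0 : alive = [] then optimized
  else
    match PySem.List.max? alive (fun it => PySem.Dict.getD st.2 it.1 0) with
    | none => optimized            -- unreachable: alive is nonempty
    | some best =>
        -- alive.remove(best); best is always a member
        let alive' := (PySem.List.remove? alive best).getD []
        pvLoopB vt (optimized ++ [best.2]) alive' (pvAbsorb vt st best.2)
  termination_by alive.length
  decreasing_by
  · rcases hr : PySem.List.remove? alive best with _ | alive'
    · simpa [hr] using List.length_pos_of_ne_nil h0
    · simpa [hr] using pvRemove_length hr

def optimize_vertex_order_alt (triangles : List (List Int)) : List (List Int) :=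
  match triangles with
  | [] => []
  | t0 :: _ =>
    let vt := pvVttB triangles
    let st := pvAbsorb vt (PySem.Set.empty, PySem.Dict.empty) t0
    pvLoopB vt [t0] ((PySem.List.enumerate triangles).drop 1) st

-- ===== PRECONDITION & SPEC =====
def Spec_optimize_vertex_order (triangles : List (List Int)) (out : List (List Int)) : Prop := out = optimize_vertex_order_alt triangles
instance (triangles : List (List Int)) (out : List (List Int)) : Decidable (Spec_optimize_vertex_order triangles out) := by unfold Spec_optimize_vertex_order; infer_instance

-- ===== CLAIM (what is proved, stated in full; the proofs are below) =====
def Claim_equal_optimize_vertex_order : Prop := ∀ (triangles : List (List Int)), Dom_optimize_vertex_order triangles → Spec_optimize_vertex_order triangles (optimize_vertex_order triangles)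

-- ===== LEMMAS AND PROOFS =====

-- A's score loop is a countP
lemma pvScoreA_eq (used : PySem.Set Int) (tri : List Int) :
    pvScoreA used tri = (tri.countP (fun v => PySem.Set.contains used v) : Int) := by
  unfold pvScoreA
  rw [PySem.List.foldl_if_add_one]
  simp only [zero_add]

lemma pvScoreA_nonneg (used : PySem.Set Int) (tri : List Int) : 0 ≤ pvScoreA used tri := by
  rw [pvScoreA_eq]; exact_mod_cast Nat.zero_le _

-- adding one new vertex raises a triangle's score by that vertex's multiplicity
lemma pvScoreA_add (used : PySem.Set Int) (v : Int) (h : PySem.Set.contains used v = false)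
    (tri : List Int) :
    pvScoreA (PySem.Set.add used v) tri = pvScoreA used tri + (tri.count v : Int) := by
  rw [pvScoreA_eq, pvScoreA_eq]
  have hadd : ∀ w, PySem.Set.contains (PySem.Set.add used v) w
      = (PySem.Set.contains used w || w == v) := by
    intro w
    unfold PySem.Set.add
    rw [h]
    simp only [Bool.false_eq_true, if_false, PySem.Set.contains, List.contains_append]
    congr 1
    by_cases hw : w = v <;> simp [hw]
  have : tri.countP (fun w => PySem.Set.contains (PySem.Set.add used v) w)
      = tri.countP (fun w => PySem.Set.contains used w) + tri.count v := by
    induction tri with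
    | nil => simp
    | cons w t ih =>
        rw [List.countP_cons, List.countP_cons, List.count_cons, ih, hadd w]
        by_cases hw : w = v
        · subst hw
          rw [h]
          simp only [beq_self_eq_true, Bool.false_or, if_true, Bool.false_eq_true, if_false]
          omega
        · have hbw : (w == v) = false := by simp [hw]
          rw [hbw]
          simp only [Bool.or_false, Bool.false_eq_true, if_false]
          omega
  rw [this]; push_cast; ring

lemma pvScoreA_empty (tri : List Int) : pvScoreA PySem.Set.empty tri = 0 := by
  rw [pvScoreA_eq]
  have h0 : tri.countP (fun v => PySem.Set.contains PySem.Set.empty v) = 0 := by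
    apply List.countP_eq_zero.mpr
    intro w _
    simp [PySem.Set.contains, PySem.Set.empty]
  rw [h0]
  rfl

-- characterisation of the adjacency dict built by B
lemma pvVttB_inner (tri : List Int) (d : PySem.Dict Int (List Int)) (i v : Int) :
    PySem.Dict.getD (tri.foldl (fun d w => PySem.Dict.modify d w [] (fun js => js ++ [i])) d) v []
      = PySem.Dict.getD d v [] ++ List.replicate (tri.count v) i := by
  induction tri generalizing d with
  | nil => simp
  | cons w t ih =>
      rw [List.foldl_cons, ih, PySem.Dict.getD_modify, List.count_cons]
      by_cases hw : v = w
      · subst hw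
        simp [List.append_assoc]
        rw [← List.replicate_succ, List.replicate_succ']
      · have hb : (w == v) = false := beq_eq_false_iff_ne.mpr (fun h => hw h.symm)
        simp [hw, hb]

lemma pvVttB_fold (L : List (Int × List Int)) (d : PySem.Dict Int (List Int)) (v : Int) :
    PySem.Dict.getD
      (L.foldl (fun d p => p.2.foldl (fun d w => PySem.Dict.modify d w [] (fun js => js ++ [p.1])) d) d) v []
      = PySem.Dict.getD d v [] ++ L.flatMap (fun p => List.replicate (p.2.count v) p.1) := by
  induction L generalizing d with
  | nil => simp
  | cons p L ih =>
      rw [List.foldl_cons, ih, pvVttB_inner, List.flatMap_cons, List.append_assoc]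

lemma pvFlatMap_count (l : List (List Int)) (v : Int) :
    ∀ (s : Int), ∀ p ∈ PySem.List.enumerate l s,
      ((PySem.List.enumerate l s).flatMap (fun q => List.replicate (q.2.count v) q.1)).count p.1
        = p.2.count v := by
  induction l with
  | nil => simp [PySem.List.enumerate_nil]
  | cons x t ih =>
      intro s p hp
      rw [PySem.List.enumerate_cons] at hp ⊢
      rw [List.flatMap_cons, List.count_append]
      rcases List.mem_cons.mp hp with h | h
      · subst h
        have h0 : (List.count (s, x).1 ((PySem.List.enumerate t (s+1)).flatMap
            (fun q => List.replicate (q.2.count v) q.1))) = 0 := by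
          apply List.count_eq_zero.mpr
          intro hmem
          obtain ⟨q, hq, hmem2⟩ := List.mem_flatMap.mp hmem
          have := List.eq_of_mem_replicate hmem2
          obtain ⟨k, hk, rfl⟩ := (PySem.List.mem_enumerate_iff _ _ _).mp hq
          simp at this
          omega
        rw [h0, List.count_replicate_self]
        simp
      · obtain ⟨k, hk, rfl⟩ := (PySem.List.mem_enumerate_iff _ _ _).mp h
        have h1 : List.count (s + 1 + ↑k, t[k]).1 (List.replicate (x.count v) s) = 0 := by
          rw [List.count_replicate]
          have : (s == (s + 1 + (k:Int), t[k]).1) = false := by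
            rw [beq_eq_false_iff_ne]; intro hc; simp at hc; omega
          simp [this]
        rw [h1, ih (s+1) _ h]
        simp

lemma pvVttB_count (triangles : List (List Int)) (v : Int) :
    ∀ p ∈ PySem.List.enumerate triangles,
      (PySem.Dict.getD (pvVttB triangles) v []).count p.1 = p.2.count v := by
  intro p hp
  unfold pvVttB
  rw [pvVttB_fold]
  simp only [PySem.Dict.getD_empty, List.nil_append]
  exact pvFlatMap_count triangles v 0 p hp

-- absorb's first component is Python A's used_vertices.update(tri)
lemma pvAbsorb_fst (vt : PySem.Dict Int (List Int)) (tri : List Int) :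
    ∀ used score, (pvAbsorb vt (used, score) tri).1 = PySem.Set.update used tri := by
  induction tri with
  | nil => intro used score; simp [pvAbsorb, PySem.Set.update]
  | cons v t ih =>
      intro used score
      unfold pvAbsorb PySem.Set.update
      rw [List.foldl_cons, List.foldl_cons]
      by_cases hc : PySem.Set.contains used v
      · have hadd : PySem.Set.add used v = used := by unfold PySem.Set.add; rw [hc]; simp
        simp only [hc, if_true, hadd]
        exact ih used score
      · simp only [Bool.not_eq_true] at hc
        simp only [hc, Bool.false_eq_true, if_false]
        exact ih (PySem.Set.add used v) _

-- absorb keeps the score dictionary in sync with A's recomputed scores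
lemma pvAbsorb_getD (vt : PySem.Dict Int (List Int)) (tri : List Int) :
    ∀ used score (id : Int) (t' : List Int),
      (∀ v, (PySem.Dict.getD vt v []).count id = t'.count v) →
      PySem.Dict.getD score id 0 = pvScoreA used t' →
      PySem.Dict.getD (pvAbsorb vt (used, score) tri).2 id 0
        = pvScoreA (PySem.Set.update used tri) t' := by
  induction tri with
  | nil =>
      intro used score id t' hcnt hsc
      simpa [pvAbsorb, PySem.Set.update] using hsc
  | cons v t ih =>
      intro used score id t' hcnt hsc
      unfold pvAbsorb PySem.Set.update
      rw [List.foldl_cons, List.foldl_cons]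
      by_cases hc : PySem.Set.contains used v
      · have hadd : PySem.Set.add used v = used := by unfold PySem.Set.add; rw [hc]; simp
        simp only [hc, if_true, hadd]
        exact ih used score id t' hcnt hsc
      · simp only [Bool.not_eq_true] at hc
        simp only [hc, Bool.false_eq_true, if_false]
        apply ih
        · exact hcnt
        · rw [PySem.Dict.getD_foldl_modify_add_one, hsc, hcnt v, pvScoreA_add used v hc t']

-- max? on a nonempty list is a running-best fold
lemma pvMax?_aux {α : Type} (f : α → Int) :
    ∀ (t : List α) (b : α),
      t.foldl (fun acc x => match acc with
        | none => some x
        | some m => if f m < f x then some x else some m) (some b)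
      = some (t.foldl (fun m x => if f m < f x then x else m) b) := by
  intro t
  induction t with
  | nil => intro b; rfl
  | cons x t ih =>
      intro b
      rw [List.foldl_cons, List.foldl_cons]
      by_cases h : f b < f x <;> simp only [h, if_true, if_false] <;> apply ih

lemma pvMax?_cons {α : Type} (f : α → Int) (a : α) (t : List α) :
    PySem.List.max? (a :: t) f = some (t.foldl (fun m x => if f m < f x then x else m) a) := by
  unfold PySem.List.max?
  rw [List.foldl_cons]
  exact pvMax?_aux f t a

lemma pvPick_congr {α : Type} (f g : α → Int) :
    ∀ (t : List α) (a : α), f a = g a → (∀ x ∈ t, f x = g x) →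
      t.foldl (fun m x => if f m < f x then x else m) a
        = t.foldl (fun m x => if g m < g x then x else m) a := by
  intro t
  induction t with
  | nil => intros; rfl
  | cons x t ih =>
      intro a ha hx
      rw [List.foldl_cons, List.foldl_cons, ha, hx x List.mem_cons_self]
      by_cases h : g a < g x <;> simp only [h, if_true, if_false]
      · exact ih x (hx x List.mem_cons_self) (fun y hy => hx y (List.mem_cons_of_mem _ hy))
      · exact ih a ha (fun y hy => hx y (List.mem_cons_of_mem _ hy))

-- the two selection loops, run in parallel over the same list
lemma pvSel_aux {α : Type} (f : (Int × α) → Int) :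
    ∀ (t : List (Int × α)) (j : Int) (b : Int × α) (k : Int),
      (let c := t.foldl (fun m x => if f m < f x then x else m) b;
       let ra := (PySem.List.enumerate t j).foldl
           (fun st q => if f q.2 > st.1 then (f q.2, some q.1) else st) (f b, some k);
       (c = b ∧ ra = (f b, some k)) ∨
       (∃ (q : Nat) (hq : q < t.length), c = t[q] ∧ ra = (f c, some (j + (q : Int))) ∧
          f b < f c ∧ ∀ q' (h' : q' < q), f (t[q']) < f c)) := by
  intro t
  induction t with
  | nil => intro j b k; left; exact ⟨rfl, rfl⟩
  | cons x t ih =>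
      intro j b k
      simp only [PySem.List.enumerate_cons, List.foldl_cons]
      by_cases h : f b < f x
      · have hgt : f x > f b := h
        simp only [if_pos h]
        rcases ih (j + 1) x j with ⟨hc, hra⟩ | ⟨q, hq, hc, hra, hlt, hstrict⟩
        · right
          refine ⟨0, by simp, ?_, ?_, ?_, fun q' h' => absurd h' (Nat.not_lt_zero q')⟩
          · simpa using hc
          · rw [hra, hc]; simp
          · rw [hc]; exact h
        · right
          refine ⟨q + 1, by simpa using Nat.succ_lt_succ hq, ?_, ?_, ?_, ?_⟩
          · simpa using hc
          · rw [hra]; congr 2; push_cast; ring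
          · exact lt_trans h hlt
          · intro q' h'
            cases q' with
            | zero => simpa using hlt
            | succ q'' => simpa using hstrict q'' (by omega)
      · have hgt : ¬ (f x > f b) := h
        simp only [if_neg h]
        rcases ih (j + 1) b k with ⟨hc, hra⟩ | ⟨q, hq, hc, hra, hlt, hstrict⟩
        · left; exact ⟨hc, hra⟩
        · right
          refine ⟨q + 1, by simpa using Nat.succ_lt_succ hq, by simpa using hc, ?_, hlt, ?_⟩
          · rw [hra]; congr 2; push_cast; ring
          · intro q' h'
            cases q' with
            | zero => simpa using lt_of_le_of_lt (le_of_not_gt h) hlt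
            | succ q'' => simpa using hstrict q'' (by omega)

-- selection lemma: both loops pick the first remaining triangle of maximal score
lemma pvSel {α : Type} (f : (Int × α) → Int)
    (hf : ∀ p, 0 ≤ f p) (a : Int × α) (t : List (Int × α)) :
    ∃ (p : Nat) (hp : p < (a :: t).length),
      ((PySem.List.enumerate (a :: t)).foldl
          (fun st q => if f q.2 > st.1 then (f q.2, some q.1) else st)
          ((-1 : Int), (none : Option Int)))
        = (f ((a :: t)[p]), some (p : Int)) ∧
      t.foldl (fun m x => if f m < f x then x else m) a = (a :: t)[p] ∧
      (∀ q (hq : q < p), f ((a :: t)[q]) < f ((a :: t)[p])) := by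
  have hstep : ((PySem.List.enumerate (a :: t)).foldl
          (fun st q => if f q.2 > st.1 then (f q.2, some q.1) else st)
          ((-1 : Int), (none : Option Int)))
      = (PySem.List.enumerate t 1).foldl
          (fun st q => if f q.2 > st.1 then (f q.2, some q.1) else st) (f a, some 0) := by
    rw [PySem.List.enumerate_cons, List.foldl_cons]
    have : f a > (-1 : Int) := lt_of_lt_of_le (by norm_num) (hf a)
    simp [this]
  rcases pvSel_aux f t 1 a 0 with ⟨hc, hra⟩ | ⟨q, hq, hc, hra, hlt, hstrict⟩
  · refine ⟨0, by simp, ?_, by simpa using hc, fun q hq => absurd hq (Nat.not_lt_zero q)⟩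
    rw [hstep, hra]
    simp
  · refine ⟨q + 1, by simpa using Nat.succ_lt_succ hq, ?_, by simpa using hc, ?_⟩
    · rw [hstep, hra]
      simp only [List.getElem_cons_succ]
      rw [hc]
      congr 2
      push_cast; ring
    · intro q' hq'
      cases q' with
      | zero => simpa [← hc] using hlt
      | succ q'' =>
          simp only [List.getElem_cons_succ]
          rw [← hc]
          exact hstrict q'' (by omega)

-- enumerate over a mapped list
lemma pvEnumerate_map {α β : Type} (g : α → β) :
    ∀ (l : List α) (j : Int),
      PySem.List.enumerate (l.map g) j
        = (PySem.List.enumerate l j).map (fun q => (q.1, g q.2)) := by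
  intro l
  induction l with
  | nil => intro j; simp [PySem.List.enumerate_nil]
  | cons x t ih =>
      intro j
      rw [List.map_cons, PySem.List.enumerate_cons, PySem.List.enumerate_cons, ih, List.map_cons]

-- main loop equivalence
lemma pvLoop_eq (vt : PySem.Dict Int (List Int)) :
    ∀ (n : Nat) (alive : List (Int × List Int)) (optimized : List (List Int))
      (used : PySem.Set Int) (score : PySem.Dict Int Int),
      alive.length = n →
      (∀ p ∈ alive, ∀ v, (PySem.Dict.getD vt v []).count p.1 = p.2.count v) →
      (∀ p ∈ alive, PySem.Dict.getD score p.1 0 = pvScoreA used p.2) →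
      pvLoopA optimized (alive.map Prod.snd) used = pvLoopB vt optimized alive (used, score) := by
  intro n
  induction n using Nat.strong_induction_on with
  | _ n IH =>
    intro alive optimized used score hlen hcnt hsc
    cases alive with
    | nil => rw [pvLoopA, pvLoopB]; simp
    | cons a t =>
      obtain ⟨p, hp, hA, hB, hstrict⟩ :=
        pvSel (fun q => pvScoreA used q.2) (fun q => pvScoreA_nonneg used q.2) a t
      have hbest : pvBestA used ((a :: t).map Prod.snd)
          = (pvScoreA used ((a :: t)[p]).2, some (p : Int)) := by
        unfold pvBestA
        rw [pvEnumerate_map, List.foldl_map]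
        exact hA
      have hplen : p < ((a :: t).map Prod.snd).length := by simpa using hp
      have hpop : PySem.List.pop? ((a :: t).map Prod.snd) ((p : Nat) : Int)
          = some ((((a :: t).map Prod.snd))[p], ((a :: t).map Prod.snd).eraseIdx p) :=
        PySem.List.pop?_natCast _ p hplen
      have hgetm : (((a :: t).map Prod.snd))[p] = ((a :: t)[p]).2 := by
        rw [List.getElem_map]
      have hkeyB : PySem.List.max? (a :: t) (fun it => PySem.Dict.getD score it.1 0)
          = some ((a :: t)[p]) := by
        rw [pvMax?_cons]
        rw [pvPick_congr (fun it => PySem.Dict.getD score it.1 0) (fun q => pvScoreA used q.2)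
          t a (hsc a List.mem_cons_self) (fun x hx => hsc x (List.mem_cons_of_mem _ hx))]
        exact congrArg some hB
      have hne : ∀ j (hj : j < p), ¬ ((a :: t)[j] = (a :: t)[p]) := by
        intro j hj heq
        exact absurd (congrArg (fun q => pvScoreA used q.2) heq) (ne_of_lt (hstrict j hj))
      have hidx : List.idxOf? ((a :: t)[p]) (a :: t) = some p :=
        List.idxOf?_eq_some_iff.mpr ⟨hp, rfl, hne⟩
      have hrem : PySem.List.remove? (a :: t) ((a :: t)[p]) = some ((a :: t).eraseIdx p) := by
        unfold PySem.List.remove?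
        rw [hidx]
        rfl
      have habs : pvAbsorb vt (used, score) ((a :: t)[p]).2
          = (PySem.Set.update used ((a :: t)[p]).2,
             (pvAbsorb vt (used, score) ((a :: t)[p]).2).2) :=
        Prod.ext (pvAbsorb_fst vt _ used score) rfl
      have hmape : (List.map Prod.snd (a :: t)).eraseIdx p
          = List.map Prod.snd ((a :: t).eraseIdx p) :=
        List.eraseIdx_map Prod.snd _ p
      rw [pvLoopA, pvLoopB]
      rw [dif_neg (by simp : ¬ (List.map Prod.snd (a :: t) = [])),
          dif_neg (by simp : ¬ (a :: t = []))]
      dsimp only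
      rw [hbest, hkeyB]
      dsimp only
      rw [hpop, hrem]
      dsimp only [Option.getD_some]
      rw [hgetm, hmape, habs]
      have hlt : ((a :: t).eraseIdx p).length < n := by
        have hp' : p ≤ t.length := by
          have := hp
          simp at this
          omega
        rw [← hlen]
        simp [List.length_eraseIdx, hp']
      exact IH _ hlt _ _ _ _ rfl
        (fun q hq v => hcnt q (List.mem_of_mem_eraseIdx hq) v)
        (fun q hq => pvAbsorb_getD vt _ used score q.1 q.2
          (hcnt q (List.mem_of_mem_eraseIdx hq)) (hsc q (List.mem_of_mem_eraseIdx hq)))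

-- ===== VERDICT (by name: the statement is the Claim_ definition above) =====
theorem optimize_vertex_order_spec : Claim_equal_optimize_vertex_order := by
  intro triangles _
  unfold Spec_optimize_vertex_order
  cases triangles with
  | nil => rfl
  | cons t0 rest =>
      unfold optimize_vertex_order optimize_vertex_order_alt
      dsimp only
      set vt := pvVttB (t0 :: rest) with hvt
      set st := pvAbsorb vt (PySem.Set.empty, PySem.Dict.empty) t0 with hst
      have halive : (PySem.List.enumerate (t0 :: rest)).drop 1 = PySem.List.enumerate rest 1 := by
        rw [PySem.List.enumerate_cons]
        rfl
      have hrest : List.map Prod.snd (PySem.List.enumerate rest 1) = rest :=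
        PySem.List.map_snd_enumerate rest 1
      have hofl : PySem.Set.ofList t0 = PySem.Set.update PySem.Set.empty t0 := rfl
      have hstp : st = (PySem.Set.update PySem.Set.empty t0, st.2) :=
        Prod.ext (pvAbsorb_fst vt t0 PySem.Set.empty PySem.Dict.empty) rfl
      have hcnt0 : ∀ p ∈ PySem.List.enumerate rest 1, ∀ v,
          (PySem.Dict.getD vt v []).count p.1 = p.2.count v := by
        intro p hp v
        apply pvVttB_count (t0 :: rest) v p
        rw [← halive] at hp
        exact List.mem_of_mem_drop hp
      have hsc0 : ∀ p ∈ PySem.List.enumerate rest 1,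
          PySem.Dict.getD st.2 p.1 0 = pvScoreA (PySem.Set.update PySem.Set.empty t0) p.2 := by
        intro p hp
        apply pvAbsorb_getD vt t0 PySem.Set.empty PySem.Dict.empty p.1 p.2 (hcnt0 p hp)
        rw [PySem.Dict.getD_empty, pvScoreA_empty]
      rw [halive, hofl, hstp]
      conv_lhs => rw [← hrest]
      exact pvLoop_eq vt (PySem.List.enumerate rest 1).length _ [t0] _ _ rfl hcnt0 hsc0
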